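-- pv_equiv track=rewrite | github.com/r-luo/QA-Summary | helpers/data_prep.py | sentence_cleaning
-- ===== SOURCE A (Python) =====
-- def sentence_cleaning(sentence, replace_list, ):
--     cleaned = []
--     prev_word = ''
--     for word in sentence:
--         if word in replace_list:
--             word = replace_list[word]
--         if not (word == prev_word):
--             prev_word = word
--             cleaned.append(word)
--     return cleaned
-- ===== SOURCE B (Python) =====
-- def _dedup(m):
--     # divide and conquer: each cleaned half has no adjacent duplicates,
--     # so only the seam needs fixing when concatenating
--     if len(m) <= 1:
--         return m
--     mid = len(m) // 2
--     left = _dedup(m[:mid])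
--     right = _dedup(m[mid:])
--     if left[-1] == right[0]:
--         return left + right[1:]
--     return left + right
--
-- def sentence_cleaning(sentence, replace_list, ):
--     mapped = [replace_list.get(w, w) for w in sentence]
--     return _dedup(mapped)
-- ===== Notes on version B (the rewrite author's own statement) =====
-- stated objective: alternative
-- what changed: Replaces A's stateful prev_word scan by a staged map pass followed by a divide-and-conquer dedup that recursively cleans each half and repairs the single seam duplicate when concatenating.
-- intended difference: On sentences whose first word maps to the empty string, A's initial prev_word='' sentinel silently drops the whole leading run of empty words (e.g. A(['','a'],{})==['a']) while B keeps one '' for that run (['','a']); B's value is intended since '' is an input word, not a marker. — e.g. on sentence_cleaning(["", "a"], []): A returns ["a"], B returns ["", "a"]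
import Mathlib
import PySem

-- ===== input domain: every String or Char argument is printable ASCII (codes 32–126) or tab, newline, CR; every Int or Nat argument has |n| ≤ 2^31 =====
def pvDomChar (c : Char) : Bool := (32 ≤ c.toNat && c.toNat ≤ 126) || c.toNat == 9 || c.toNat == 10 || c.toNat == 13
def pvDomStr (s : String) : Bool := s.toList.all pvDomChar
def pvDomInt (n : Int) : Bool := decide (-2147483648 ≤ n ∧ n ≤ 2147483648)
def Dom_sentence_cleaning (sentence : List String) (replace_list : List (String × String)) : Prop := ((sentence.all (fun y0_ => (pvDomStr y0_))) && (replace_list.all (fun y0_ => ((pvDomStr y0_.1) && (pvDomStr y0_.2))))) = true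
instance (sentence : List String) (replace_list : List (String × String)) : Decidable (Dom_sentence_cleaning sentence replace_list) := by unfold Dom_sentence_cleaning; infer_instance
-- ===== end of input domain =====

-- B replaces A's stateful prev_word scan by a staged map pass plus a divide-and-conquer
-- dedup (clean each half recursively, repair the seam on concatenation); intended
-- difference: A's '' sentinel drops a leading run of empty-string words, B keeps it (D_ below).


-- ===== PORT A =====
-- literal port of A: the loop body as a helper, folded over the words with state (cleaned, prev_word)
def scStepA (d : PySem.Dict String String) (st : List String × String) (word : String) : List String × String :=
  let word := if d.contains word then (d.get? word).getD word else word
  if word == st.2 then st else (st.1 ++ [word], word)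

def sentence_cleaning (sentence : List String) (replace_list : List (String × String)) : List String :=
  (sentence.foldl (scStepA ⟨replace_list⟩) ([], "")).1

-- ===== PORT B =====
-- _dedup: recursively clean the two halves, then fix the seam; left[-1] == right[0] is
-- compared via getLast?/head? (both halves are nonempty whenever this branch is reached);
-- the fuel counter (= initial length, each half is strictly shorter) only makes the
-- recursion structural and is never exhausted
def scDC : Nat → List String → List String
  | 0, m => m
  | fuel + 1, m =>
    if m.length ≤ 1 then m
    else
      let mid := m.length / 2
      let L := scDC fuel (m.take mid)
      let R := scDC fuel (m.drop mid)
      if L.getLast? == R.head? then L ++ R.tail else L ++ R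

def sentence_cleaning_alt (sentence : List String) (replace_list : List (String × String)) : List String :=
  let d : PySem.Dict String String := ⟨replace_list⟩
  scDC sentence.length (sentence.map (fun w => d.getD w w))

-- ===== PRECONDITION & SPEC =====
-- On sentences whose first word maps to the empty string, A's initial prev_word = '' sentinel
-- silently drops the whole leading run of empty words, while B keeps a single '' for that run;
-- B's value is intended since '' is a word of the input, not a marker.
def D_sentence_cleaning (sentence : List String) (replace_list : List (String × String)) : Prop :=
  sentence ≠ [] ∧ (PySem.Dict.getD ⟨replace_list⟩ (sentence.headD "") (sentence.headD "")) = ""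
instance (sentence : List String) (replace_list : List (String × String)) : Decidable (D_sentence_cleaning sentence replace_list) := by unfold D_sentence_cleaning; infer_instance

def Spec_sentence_cleaning (sentence : List String) (replace_list : List (String × String)) (out : List String) : Prop := ¬ D_sentence_cleaning sentence replace_list → out = sentence_cleaning_alt sentence replace_list
instance (sentence : List String) (replace_list : List (String × String)) (out : List String) : Decidable (Spec_sentence_cleaning sentence replace_list out) := by unfold Spec_sentence_cleaning; infer_instance

def pvDiffWitness_sentence_cleaning : List String × (List (String × String)) := (["", "a"], [])
def pvDiffWitnessOut_sentence_cleaning : (List String) × (List String) := (["a"], ["", "a"])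

-- ===== CLAIM (what is proved, stated in full; the proofs are below) =====
def Claim_unchanged_sentence_cleaning : Prop := ∀ (sentence : List String) (replace_list : List (String × String)), Dom_sentence_cleaning sentence replace_list → Spec_sentence_cleaning sentence replace_list (sentence_cleaning sentence replace_list)
def Claim_changed_sentence_cleaning : Prop := Dom_sentence_cleaning (pvDiffWitness_sentence_cleaning.1) (pvDiffWitness_sentence_cleaning.2) ∧ D_sentence_cleaning (pvDiffWitness_sentence_cleaning.1) (pvDiffWitness_sentence_cleaning.2) ∧ sentence_cleaning (pvDiffWitness_sentence_cleaning.1) (pvDiffWitness_sentence_cleaning.2) = pvDiffWitnessOut_sentence_cleaning.1 ∧ sentence_cleaning_alt (pvDiffWitness_sentence_cleaning.1) (pvDiffWitness_sentence_cleaning.2) = pvDiffWitnessOut_sentence_cleaning.2 ∧ pvDiffWitnessOut_sentence_cleaning.1 ≠ pvDiffWitnessOut_sentence_cleaning.2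
def Claim_exact_sentence_cleaning : Prop := ∀ (sentence : List String) (replace_list : List (String × String)), Dom_sentence_cleaning sentence replace_list → D_sentence_cleaning sentence replace_list → sentence_cleaning sentence replace_list ≠ sentence_cleaning_alt sentence replace_list

-- ===== LEMMAS AND PROOFS =====

-- collapse of consecutive duplicates: the common characterisation both ports are reduced to
def scCollapse : List String → List String
  | [] => []
  | [x] => [x]
  | x :: y :: rest => if x == y then scCollapse (y :: rest) else x :: scCollapse (y :: rest)

-- A's word-mapping step equals dict.getD
theorem sc_map_eq (d : PySem.Dict String String) (w : String) :
    (if d.contains w then (d.get? w).getD w else w) = d.getD w w := by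
  by_cases h : d.contains w = true
  · simp [h, PySem.Dict.getD_eq_get?_getD]
  · simp only [Bool.not_eq_true] at h
    rw [if_neg (by simp [h]), PySem.Dict.getD_of_not_contains d w h]

theorem scStepA_eq (d : PySem.Dict String String) (st : List String × String) (w : String) :
    scStepA d st w =
      if d.getD w w = st.2 then st else (st.1 ++ [d.getD w w], d.getD w w) := by
  simp [scStepA, sc_map_eq]

-- A's loop, written as a recursion on the remaining words (no accumulator)
def scAux (d : PySem.Dict String String) (prev : String) : List String → List String
  | [] => []
  | w :: ws =>
    let m := d.getD w w
    if m == prev then scAux d prev ws else m :: scAux d m ws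

theorem sc_foldl_eq (d : PySem.Dict String String) (ws : List String) :
    ∀ (acc : List String) (prev : String),
    (ws.foldl (scStepA d) (acc, prev)).1 = acc ++ scAux d prev ws := by
  induction ws with
  | nil => intro acc prev; simp [scAux]
  | cons w ws ih =>
    intro acc prev
    rw [List.foldl_cons, scStepA_eq]
    by_cases h : d.getD w w = prev
    · rw [if_pos h, ih]
      simp [scAux, h]
    · rw [if_neg h, ih]
      simp [scAux, h]

theorem scCollapse_cons (m : String) (rest : List String) :
    scCollapse (m :: rest) = m :: scCollapse (rest.dropWhile (· == m)) := by
  induction rest with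
  | nil => simp [scCollapse]
  | cons y t ih =>
    by_cases h : y = m
    · subst h
      rw [show scCollapse (y :: y :: t) = scCollapse (y :: t) from by simp [scCollapse]]
      rw [ih]
      simp [List.dropWhile]
    · rw [show scCollapse (m :: y :: t) = m :: scCollapse (y :: t) from by
          simp [scCollapse, Ne.symm h]]
      rw [List.dropWhile_cons, if_neg (by simp [h])]

theorem scAux_eq (d : PySem.Dict String String) (ws : List String) :
    ∀ (prev : String),
    scAux d prev ws = scCollapse ((ws.map (fun w => d.getD w w)).dropWhile (· == prev)) := by
  induction ws with
  | nil => intro prev; simp [scAux, scCollapse]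
  | cons w t ih =>
    intro prev
    by_cases h : d.getD w w = prev
    · rw [show scAux d prev (w :: t) = scAux d prev t from by simp [scAux, h]]
      rw [List.map_cons, List.dropWhile_cons, if_pos (by simp [h])]
      exact ih prev
    · rw [show scAux d prev (w :: t) = d.getD w w :: scAux d (d.getD w w) t from by
          simp [scAux, h]]
      rw [List.map_cons, List.dropWhile_cons, if_neg (by simp [h])]
      rw [scCollapse_cons, ih (d.getD w w)]

theorem sc_A_char (sentence : List String) (replace_list : List (String × String)) :
    sentence_cleaning sentence replace_list
      = scCollapse ((sentence.map
          (fun w => (PySem.Dict.mk replace_list).getD w w)).dropWhile (· == "")) := by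
  unfold sentence_cleaning
  rw [sc_foldl_eq, scAux_eq]
  simp

-- the head of l.dropWhile (· == s) is never s
theorem sc_dropWhile_head (s : String) (l : List String) :
    ∀ x t, l.dropWhile (· == s) = x :: t → x ≠ s := by
  induction l with
  | nil => intro x t h; simp at h
  | cons y l ih =>
    intro x t h
    by_cases hy : y = s
    · rw [List.dropWhile_cons, if_pos (by simp [hy])] at h
      exact ih x t h
    · rw [List.dropWhile_cons, if_neg (by simp [hy])] at h
      cases h; exact hy

-- basic shape facts about scCollapse
theorem scCollapse_ne_nil (l : List String) (h : l ≠ []) : scCollapse l ≠ [] := by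
  cases l with
  | nil => exact absurd rfl h
  | cons x t => rw [scCollapse_cons]; simp

theorem scCollapse_head? (l : List String) : (scCollapse l).head? = l.head? := by
  cases l with
  | nil => rfl
  | cons x t => rw [scCollapse_cons]; rfl

theorem scCollapse_getLast? (l : List String) : (scCollapse l).getLast? = l.getLast? := by
  induction l with
  | nil => rfl
  | cons x t ih =>
    cases t with
    | nil => rfl
    | cons y t' =>
      by_cases h : x = y
      · rw [show scCollapse (x :: y :: t') = scCollapse (y :: t') from by simp [scCollapse, h]]
        rw [ih, List.getLast?_cons_cons]
      · rw [show scCollapse (x :: y :: t') = x :: scCollapse (y :: t') from by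
            simp [scCollapse, h]]
        rw [List.getLast?_cons_cons]
        obtain ⟨z, zs, hz⟩ := List.exists_cons_of_ne_nil (scCollapse_ne_nil (y :: t') (by simp))
        rw [hz, List.getLast?_cons_cons, ← hz, ih]

-- collapsing a concatenation: clean both parts, then repair the seam
theorem scCollapse_append (l1 l2 : List String) (h1 : l1 ≠ []) (h2 : l2 ≠ []) :
    scCollapse (l1 ++ l2) =
      if l1.getLast? == l2.head? then scCollapse l1 ++ (scCollapse l2).tail
      else scCollapse l1 ++ scCollapse l2 := by
  induction l1 with
  | nil => exact absurd rfl h1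
  | cons x t ih =>
    cases t with
    | nil =>
      cases l2 with
      | nil => exact absurd rfl h2
      | cons y ys =>
        by_cases h : x = y
        · rw [show ([x] ++ y :: ys : List String) = x :: y :: ys from rfl]
          rw [show scCollapse (x :: y :: ys) = scCollapse (y :: ys) from by
              simp [scCollapse, h]]
          rw [if_pos (by simp [h])]
          rw [scCollapse_cons y ys]
          subst h
          rfl
        · rw [show ([x] ++ y :: ys : List String) = x :: y :: ys from rfl]
          rw [show scCollapse (x :: y :: ys) = x :: scCollapse (y :: ys) from by
              simp [scCollapse, h]]
          rw [if_neg (by simp [h])]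
          simp [scCollapse]
    | cons z t' =>
      have ihz := ih (by simp)
      rw [show ((x :: z :: t') ++ l2 : List String) = x :: (z :: t') ++ l2 from rfl]
      by_cases h : x = z
      · rw [show scCollapse (x :: (z :: t') ++ l2) = scCollapse ((z :: t') ++ l2) from by
            simp [scCollapse, h]]
        rw [ihz]
        rw [show scCollapse (x :: z :: t') = scCollapse (z :: t') from by
            simp [scCollapse, h]]
        rw [List.getLast?_cons_cons]
      · rw [show scCollapse (x :: (z :: t') ++ l2) = x :: scCollapse ((z :: t') ++ l2) from by
            simp [scCollapse, h]]
        rw [ihz]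
        rw [show scCollapse (x :: z :: t') = x :: scCollapse (z :: t') from by
            simp [scCollapse, h]]
        rw [List.getLast?_cons_cons]
        split_ifs <;> simp

-- B's divide-and-conquer dedup computes scCollapse (fuel ≥ length suffices)
theorem scDC_eq (n : Nat) : ∀ (m : List String), m.length ≤ n → scDC n m = scCollapse m := by
  induction n with
  | zero =>
    intro m hm
    match m, hm with
    | [], _ => rfl
  | succ n ih =>
    intro m hm
    rw [scDC]
    by_cases h : m.length ≤ 1
    · rw [if_pos h]
      match m, h with
      | [], _ => rfl
      | [x], _ => rfl
    · rw [if_neg h]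
      have ihL := ih (m.take (m.length / 2)) (by simp only [List.length_take]; omega)
      have ihR := ih (m.drop (m.length / 2)) (by simp only [List.length_drop]; omega)
      have htake : m.take (m.length / 2) ≠ [] := by
        intro hc; have := congrArg List.length hc
        simp only [List.length_take, List.length_nil] at this; omega
      have hdrop : m.drop (m.length / 2) ≠ [] := by
        intro hc; have := congrArg List.length hc
        simp only [List.length_drop, List.length_nil] at this; omega
      simp only [ihL, ihR, scCollapse_getLast?, scCollapse_head?]
      conv_rhs => rw [← List.take_append_drop (m.length / 2) m]
      rw [scCollapse_append _ _ htake hdrop]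

theorem sc_B_char (sentence : List String) (replace_list : List (String × String)) :
    sentence_cleaning_alt sentence replace_list
      = scCollapse (sentence.map (fun w => (PySem.Dict.mk replace_list).getD w w)) := by
  unfold sentence_cleaning_alt
  exact scDC_eq _ _ (by simp)

-- ===== VERDICT (by name: the statement is the Claim_ definition above) =====
theorem sentence_cleaning_spec : Claim_unchanged_sentence_cleaning := by
  intro sentence replace_list _ hD
  rw [sc_A_char, sc_B_char]
  cases sentence with
  | nil => simp
  | cons w t =>
    have hne : ¬ ((PySem.Dict.mk replace_list).getD w w = "") := by
      intro h; exact hD ⟨by simp, by simpa using h⟩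
    simp only [List.map_cons]
    rw [List.dropWhile_cons_of_neg (by simpa using hne)]

theorem sentence_cleaning_changed : Claim_changed_sentence_cleaning := by
  unfold Claim_changed_sentence_cleaning
  refine ⟨by decide, by decide, by decide, ?_, by decide⟩
  rw [sc_B_char]; decide

theorem sentence_cleaning_tight : Claim_exact_sentence_cleaning := by
  intro sentence replace_list _ hD heq
  obtain ⟨hne, hhead⟩ := hD
  cases sentence with
  | nil => exact hne rfl
  | cons w t =>
    have hw : (PySem.Dict.mk replace_list).getD w w = "" := by simpa using hhead
    rw [sc_A_char, sc_B_char] at heq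
    simp only [List.map_cons, hw] at heq
    rw [scCollapse_cons] at heq
    rw [List.dropWhile_cons_of_pos (by simp)] at heq
    cases hcase : (t.map (fun w => (PySem.Dict.mk replace_list).getD w w)).dropWhile (· == "") with
    | nil => rw [hcase] at heq; simp [scCollapse] at heq
    | cons x xs =>
      rw [hcase, scCollapse_cons] at heq
      have hx : x ≠ "" := sc_dropWhile_head _ _ _ _ hcase
      exact hx (by injection heq)
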